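-- pv_equiv track=rewrite | github.com/JustyRodriguez/-LFP-Proyecto2_202100058 | LFP_Proyecto2_202100058/Proyecto 2_LFPB+_202100058/Proyecto 2 LFP.py | afd_string
-- ===== SOURCE A (Python) =====
-- def afd_string(lexema):
--     pat = '".*"'
--     estado=0
--     aceptacion=[2]
--
--     for char in lexema:
--         if estado == 0:
--             if char == "\"":
--                 estado = 1
--             else:
--                 estado = -5
--         elif estado == 1:
--             if char == "\"":
--                 estado = 2
--             elif char != "\n":
--                 estado = 1
--             else:
--             	estado = -5
--         elif estado == 2:
--             if char == "\n" or char != "\n":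
--                 estado = -5
--
--     if estado in aceptacion:
--         return True
--     else:
--         return False
-- ===== SOURCE B (Python) =====
-- def afd_string(lexema):
--     return (len(lexema) >= 2 and lexema[0] == '"' and lexema[-1] == '"'
--             and '"' not in lexema[1:-1] and '\n' not in lexema[1:-1])
-- ===== Notes on version B (the rewrite author's own statement) =====
-- stated objective: simpler
-- what changed: Replaces the explicit DFA state loop with a single boolean predicate: length at least 2, starts and ends with a double quote, and no quote or newline strictly inside.
import Mathlib
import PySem

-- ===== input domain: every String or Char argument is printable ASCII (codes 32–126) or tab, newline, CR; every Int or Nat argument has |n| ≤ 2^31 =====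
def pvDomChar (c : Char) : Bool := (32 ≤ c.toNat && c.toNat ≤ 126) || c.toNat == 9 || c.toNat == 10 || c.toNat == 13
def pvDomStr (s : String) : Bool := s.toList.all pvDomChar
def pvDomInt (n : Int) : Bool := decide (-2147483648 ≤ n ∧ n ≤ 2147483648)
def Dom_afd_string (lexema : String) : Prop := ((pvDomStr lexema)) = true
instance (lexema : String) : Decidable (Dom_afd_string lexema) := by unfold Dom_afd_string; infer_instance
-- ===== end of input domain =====

-- B replaces A's explicit DFA state loop by a single boolean predicate (simpler, same O(n) cost).

-- ===== PORT A =====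
-- one DFA transition: A's if/elif chain on the state, branches in source order
def afdStep (estado : Int) (char : Char) : Int :=
  if estado = 0 then
    if char = '"' then 1 else -5
  else if estado = 1 then
    if char = '"' then 2
    else if char ≠ '\n' then 1
    else -5
  else if estado = 2 then
    if char = '\n' ∨ char ≠ '\n' then -5 else estado
  else estado

def afd_string (lexema : String) : Bool :=
  let estado : Int := 0
  let aceptacion : List Int := [2]
  let estado := lexema.toList.foldl afdStep estado
  if estado ∈ aceptacion then true else false

-- ===== PORT B =====
def afd_string_alt (lexema : String) : Bool :=
  let l := lexema.toList
  decide (2 ≤ l.length) && (l.headD ' ' == '"') && (l.getLastD ' ' == '"')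
    && !((l.drop 1).dropLast.contains '"') && !((l.drop 1).dropLast.contains '\n')

-- ===== PRECONDITION & SPEC =====
def Spec_afd_string (lexema : String) (out : Bool) : Prop := out = afd_string_alt lexema
instance (lexema : String) (out : Bool) : Decidable (Spec_afd_string lexema out) := by unfold Spec_afd_string; infer_instance

-- ===== CLAIM (what is proved, stated in full; the proofs are below) =====
def Claim_equal_afd_string : Prop := ∀ (lexema : String), Dom_afd_string lexema → Spec_afd_string lexema (afd_string lexema)

-- ===== LEMMAS AND PROOFS =====

theorem afdStep_dead (l : List Char) : l.foldl afdStep (-5) = -5 := by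
  induction l with
  | nil => rfl
  | cons c rest ih => simpa [afdStep] using ih

theorem afdStep_eval0 (c : Char) : afdStep 0 c = if c = '"' then 1 else -5 := by
  simp [afdStep]

theorem afdStep_eval1 (c : Char) :
    afdStep 1 c = if c = '"' then 2 else if c ≠ '\n' then 1 else -5 := by
  simp [afdStep]

theorem afdStep_eval2 (c : Char) : afdStep 2 c = -5 := by
  simp [afdStep, em]

theorem afdStep_two (c : Char) (rest : List Char) :
    (c :: rest).foldl afdStep 2 = -5 := by
  rw [List.foldl_cons, afdStep_eval2, afdStep_dead]

-- characterization of the loop from state 1 (inside the open quote)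
theorem afdStep_one (l : List Char) :
    (l.foldl afdStep 1 = 2) ↔
      (l.getLast? = some '"' ∧ '"' ∉ l.dropLast ∧ '\n' ∉ l.dropLast) := by
  induction l with
  | nil => simp
  | cons c rest ih =>
    rw [List.foldl_cons, afdStep_eval1]
    by_cases hq : c = '"'
    · subst hq
      rw [if_pos rfl]
      cases rest with
      | nil => simp
      | cons d rs =>
        rw [afdStep_two]
        simp [List.getLast?_cons_cons, List.dropLast_cons_of_ne_nil]
    · by_cases hn : c = '\n'
      · subst hn
        rw [if_neg hq, if_neg (by simp)]
        rw [afdStep_dead]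
        cases rest with
        | nil => simp
        | cons d rs =>
          simp [List.getLast?_cons_cons, List.dropLast_cons_of_ne_nil]
      · rw [if_neg hq, if_pos hn, ih]
        cases rest with
        | nil => simp [hq]
        | cons d rs =>
          simp [List.getLast?_cons_cons, List.dropLast_cons_of_ne_nil,
            and_assoc, and_left_comm]
          tauto

-- ===== VERDICT (by name: the statement is the Claim_ definition above) =====
theorem afd_string_spec : Claim_equal_afd_string := by
  intro lexema _
  unfold Spec_afd_string afd_string afd_string_alt
  cases hl : lexema.toList with
  | nil => simp
  | cons c rest =>
    simp only [List.mem_singleton]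
    rw [List.foldl_cons, afdStep_eval0]
    by_cases hq : c = '"'
    · subst hq
      rw [if_pos rfl]
      cases rest with
      | nil => simp
      | cons d rs =>
        simp only [List.length_cons, List.headD_cons, List.drop_succ_cons,
          List.drop_zero]
        rw [show (if (d :: rs).foldl afdStep 1 = 2 then true else false)
              = decide ((d :: rs).foldl afdStep 1 = 2) by simp]
        rw [show decide ((d :: rs).foldl afdStep 1 = 2)
              = decide ((d :: rs).getLast? = some '"' ∧ '"' ∉ (d :: rs).dropLast ∧
                  '\n' ∉ (d :: rs).dropLast) from decide_eq_decide.mpr (afdStep_one (d :: rs))]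
        cases hxs : (d :: rs).getLast? with
        | none => simp at hxs
        | some x =>
          by_cases hx : x = '"'
          · subst hx
            simp [List.getLastD_eq_getLast?, List.getLast?_cons_cons, hxs,
              List.contains_eq_mem]
          · simp [List.getLastD_eq_getLast?, List.getLast?_cons_cons, hxs, hx,
              List.contains_eq_mem]
    · rw [if_neg hq, afdStep_dead]
      simp [List.headD, hq]
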